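-- pv_equiv track=rewrite | github.com/lordstone/shua_python | longest_pto.py | find_longest_pto
-- ===== SOURCE A (Python) =====
-- def find_longest_pto(cal: str, pto: int) -> int:
--     """
--     This function finds the longest PTO days with the given calendar string and PTO allowance.
--     'w' is a workday, 'h' is a holiday.
--     """
--     best = 0
--     start = 0
--
--
--     for idx, s in enumerate(cal):
--         assert s in 'wh', "Invalid character in calendar string. Only 'w' and 'h' are allowed."
--         if s == 'h':
--             continue
--         if s == 'w':
--             if pto > 0:
--                 pto -= 1
--                 continue
--             best = max(best, idx - start)
--             while start < idx and cal[start] == 'h':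
--                 start += 1
--             if cal[start] == 'w':
--                 start += 1
--
--     return max(best, len(cal) - start)
-- ===== SOURCE B (Python) =====
-- def find_longest_pto(cal: str, pto: int) -> int:
--     # Prefix-count + binary-search re-implementation (alternative algorithm).
--     P = [0]
--     for ch in cal:
--         assert ch in 'wh', "Invalid character in calendar string. Only 'w' and 'h' are allowed."
--         P.append(P[-1] + (1 if ch == 'w' else 0))
--     k = pto if pto > 0 else 0
--     best = 0
--     for r in range(len(cal)):
--         target = P[r + 1] - k
--         lo, hi = 0, len(P)
--         while lo < hi:
--             mid = (lo + hi) // 2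
--             if P[mid] < target:
--                 lo = mid + 1
--             else:
--                 hi = mid
--         if r + 1 - lo > best:
--             best = r + 1 - lo
--     return best
-- ===== Notes on version B (the rewrite author's own statement) =====
-- stated objective: alternative
-- what changed: Replaced A's single-pass sliding-window with moving start pointer by a prefix-workday-count array plus a hand-written binary search (bisect_left) over it for each right endpoint.
import Mathlib
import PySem

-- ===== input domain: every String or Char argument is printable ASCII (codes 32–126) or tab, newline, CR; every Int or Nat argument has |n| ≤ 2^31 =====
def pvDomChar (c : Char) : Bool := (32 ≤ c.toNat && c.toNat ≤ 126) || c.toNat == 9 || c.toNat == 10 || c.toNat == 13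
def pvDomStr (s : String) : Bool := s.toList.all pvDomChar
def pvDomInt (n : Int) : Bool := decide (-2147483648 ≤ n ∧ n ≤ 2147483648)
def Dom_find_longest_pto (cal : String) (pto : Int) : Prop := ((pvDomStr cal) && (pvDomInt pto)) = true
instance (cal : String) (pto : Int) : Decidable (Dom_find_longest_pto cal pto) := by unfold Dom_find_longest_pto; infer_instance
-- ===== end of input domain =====

-- B replaces A's sliding start-pointer with a prefix-count array plus binary search per right endpoint
-- (alternative algorithm, same exact values); on strings with characters other than 'w'/'h' both
-- Pythons raise AssertionError, so those inputs are outside Pre_.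

-- ===== PORT A =====
-- inner `while start < idx and cal[start] == 'h': start += 1` loop of A
def pvWhileH (l : List Char) (idx : Int) (start : Int) : Int :=
  if h : start < idx ∧ PySem.List.pyGet? l start = some 'h' then pvWhileH l idx (start + 1)
  else start
termination_by (idx - start).toNat
decreasing_by omega

-- body of A's `for idx, s in enumerate(cal)` loop; state = (best, start, pto)
def pvStepA (l : List Char) (st : Int × Int × Int) (p : Int × Char) : Int × Int × Int :=
  let best := st.1
  let start := st.2.1
  let pto := st.2.2
  let idx := p.1
  let s := p.2
  if s = 'h' then (best, start, pto)
  else if s = 'w' then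
    if pto > 0 then (best, start, pto - 1)
    else
      let best := max best (idx - start)
      let start := pvWhileH l idx start
      let start := if PySem.List.pyGet? l start = some 'w' then start + 1 else start
      (best, start, pto)
  else (best, start, pto)  -- unreachable under Pre_ (the assert fires in Python)

def find_longest_pto (cal : String) (pto : Int) : Int :=
  let l := cal.toList
  let st := (PySem.List.enumerate l).foldl (pvStepA l) (0, 0, pto)
  max st.1 ((l.length : Int) - st.2.1)

-- ===== PORT B =====
-- hand-written bisect_left loop of Source B (lo/hi are nonnegative Python ints; indexing in range)
def pvBisect (P : List Int) (target : Int) (lo hi : Nat) : Nat :=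
  if h : lo < hi then
    let mid := (lo + hi) / 2
    if P.getD mid 0 < target then pvBisect P target (mid + 1) hi
    else pvBisect P target lo mid
  else lo
termination_by hi - lo
decreasing_by all_goals omega

def find_longest_pto_alt (cal : String) (pto : Int) : Int :=
  let P : List Int := cal.toList.foldl
    (fun (P : List Int) ch => P ++ [PySem.List.pyGetD P (-1) 0 + (if ch = 'w' then 1 else 0)]) [0]
  let k : Int := if pto > 0 then pto else 0
  (PySem.List.pyRange 0 (cal.toList.length : Int) 1).foldl
    (fun best r =>
      let target := PySem.List.pyGetD P (r + 1) 0 - k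
      let lo := pvBisect P target 0 P.length
      if r + 1 - (lo : Int) > best then r + 1 - (lo : Int) else best) 0

-- ===== PRECONDITION & SPEC =====
-- Pre_ excludes exactly the strings containing a character other than 'w'/'h', on which A's assert raises AssertionError.
def Pre_find_longest_pto (cal : String) (pto : Int) : Prop :=
  (cal.toList.all (fun c => c == 'w' || c == 'h')) = true
instance (cal : String) (pto : Int) : Decidable (Pre_find_longest_pto cal pto) := by
  unfold Pre_find_longest_pto; infer_instance

def pvWitness_find_longest_pto : String × Int := ("wh", 1)

def Spec_find_longest_pto (cal : String) (pto : Int) (out : Int) : Prop := out = find_longest_pto_alt cal pto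
instance (cal : String) (pto : Int) (out : Int) : Decidable (Spec_find_longest_pto cal pto out) := by unfold Spec_find_longest_pto; infer_instance

-- ===== CLAIM (what is proved, stated in full; the proofs are below) =====
def Claim_equal_find_longest_pto : Prop := ∀ (cal : String) (pto : Int), Dom_find_longest_pto cal pto → Pre_find_longest_pto cal pto → Spec_find_longest_pto cal pto (find_longest_pto cal pto)

-- ===== LEMMAS AND PROOFS =====

-- number of workdays among the first x days
def pvC (l : List Char) (x : Nat) : Nat := (l.take x).count 'w'

-- least left endpoint L such that the window [L, x) contains at most k workdays
def pvF (l : List Char) (k x : Nat) : Nat :=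
  Nat.find (p := fun L => pvC l x ≤ pvC l L + k) ⟨x, Nat.le_add_right _ _⟩

-- window value at right boundary x, and the running maximum
def pvG (l : List Char) (k x : Nat) : Int := (x : Int) - (pvF l k x : Int)

def pvM (l : List Char) (k : Nat) : Nat → Int
  | 0 => 0
  | x + 1 => max (pvM l k x) (pvG l k (x + 1))

theorem pvC_succ (l : List Char) (x : Nat) (hx : x < l.length) :
    pvC l (x + 1) = pvC l x + (if l[x] = 'w' then 1 else 0) := by
  unfold pvC
  rw [List.take_add_one, List.getElem?_eq_getElem hx, List.count_append]
  simp [List.count_singleton, beq_iff_eq]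

theorem pvC_succ_le (l : List Char) (x : Nat) : pvC l (x + 1) ≤ pvC l x + 1 := by
  unfold pvC
  rw [List.take_add_one, List.count_append]
  have : (l[x]?.toList.count 'w') ≤ 1 := by
    cases h : l[x]? <;> simp [List.count_singleton] <;> split <;> omega
  omega

theorem pvC_mono (l : List Char) {x y : Nat} (h : x ≤ y) : pvC l x ≤ pvC l y := by
  unfold pvC
  exact ((List.take_prefix_take_left (l := l) h).sublist).count_le _

theorem pvF_spec (l : List Char) (k x : Nat) : pvC l x ≤ pvC l (pvF l k x) + k :=
  Nat.find_spec (p := fun L => pvC l x ≤ pvC l L + k) ⟨x, Nat.le_add_right _ _⟩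

theorem pvF_min (l : List Char) (k x : Nat) {j : Nat} (hj : j < pvF l k x) :
    ¬ (pvC l x ≤ pvC l j + k) :=
  Nat.find_min (p := fun L => pvC l x ≤ pvC l L + k) ⟨x, Nat.le_add_right _ _⟩ hj

theorem pvF_le (l : List Char) (k x : Nat) : pvF l k x ≤ x := by
  unfold pvF; exact Nat.find_min' _ (Nat.le_add_right _ _)

theorem pvF_congr (l : List Char) (k x y : Nat) (h : pvC l x = pvC l y) :
    pvF l k x = pvF l k y := by
  unfold pvF
  exact Nat.find_congr' (fun {n} => by rw [h])

theorem pvF_eq_zero (l : List Char) (k x : Nat) (h : pvC l x ≤ k) : pvF l k x = 0 := by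
  unfold pvF
  rw [Nat.find_eq_zero ⟨x, Nat.le_add_right _ _⟩]
  have h0 : pvC l 0 = 0 := rfl
  omega

theorem pvF_exact (l : List Char) (k x : Nat) (h : k ≤ pvC l x) :
    pvC l (pvF l k x) + k = pvC l x := by
  have hs := pvF_spec l k x
  have h0 : pvC l 0 = 0 := rfl
  rcases hf : pvF l k x with _ | j
  · rw [hf] at hs
    omega
  · have hm := pvF_min l k x (j := j) (by omega)
    have := pvC_succ_le l j
    rw [hf] at hs
    omega

-- characterisation of A's inner while loop
theorem pvWhileH_props (l : List Char) (x : Nat) (hx : x ≤ l.length) :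
    ∀ s : Nat, s ≤ x →
      ∃ w : Nat, pvWhileH l (x : Int) (s : Int) = (w : Int) ∧ s ≤ w ∧ w ≤ x ∧
        (∀ j, s ≤ j → j < w → l[j]? = some 'h') ∧
        (w = x ∨ l[w]? ≠ some 'h') := by
  suffices H : ∀ n s, x - s ≤ n → s ≤ x →
      ∃ w : Nat, pvWhileH l (x : Int) (s : Int) = (w : Int) ∧ s ≤ w ∧ w ≤ x ∧
        (∀ j, s ≤ j → j < w → l[j]? = some 'h') ∧
        (w = x ∨ l[w]? ≠ some 'h') by
    intro s hs; exact H (x - s) s le_rfl hs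
  intro n
  induction n with
  | zero =>
    intro s hn hs
    have hsx : s = x := by omega
    rw [pvWhileH]
    have hc : ¬ ((s : Int) < (x : Int) ∧ PySem.List.pyGet? l (s : Int) = some 'h') := by
      rintro ⟨h1, -⟩; omega
    rw [dif_neg hc]
    exact ⟨s, rfl, le_rfl, hs, fun j h1 h2 => by omega, Or.inl hsx⟩
  | succ n ih =>
    intro s hn hs
    rw [pvWhileH]
    by_cases hc : ((s : Int) < (x : Int) ∧ PySem.List.pyGet? l (s : Int) = some 'h')
    · rw [dif_pos hc]
      have hsx : s < x := by exact_mod_cast hc.1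
      have hcast : (s : Int) + 1 = ((s + 1 : Nat) : Int) := by push_cast; ring
      rw [hcast]
      obtain ⟨w, hw, h1, h2, h3, h4⟩ := ih (s + 1) (by omega) (by omega)
      refine ⟨w, hw, by omega, h2, ?_, h4⟩
      intro j hj1 hj2
      rcases Nat.eq_or_lt_of_le hj1 with rfl | hj
      · have := hc.2
        rwa [PySem.List.pyGet?_natCast] at this
      · exact h3 j hj hj2
    · rw [dif_neg hc]
      refine ⟨s, rfl, le_rfl, hs, fun j h1 h2 => by omega, ?_⟩
      rcases Nat.eq_or_lt_of_le hs with rfl | hlt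
      · exact Or.inl rfl
      · right
        intro hcon
        exact hc ⟨by exact_mod_cast hlt, by rwa [PySem.List.pyGet?_natCast]⟩

theorem pvC_const_of_h (l : List Char) (s w : Nat) (hsw : s ≤ w) (hw : w ≤ l.length)
    (hh : ∀ j, s ≤ j → j < w → l[j]? = some 'h') : pvC l w = pvC l s := by
  induction w with
  | zero => have : s = 0 := by omega
            rw [this]
  | succ v ih =>
    rcases Nat.eq_or_lt_of_le hsw with rfl | hlt
    · rfl
    · have hv : v < l.length := by omega
      have hvh : l[v] = 'h' := by
        have := hh v (by omega) (by omega)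
        rw [List.getElem?_eq_getElem hv] at this
        injection this
      rw [pvC_succ l v hv, hvh]
      simp only [if_neg (by decide : ¬ ('h' : Char) = 'w'), Nat.add_zero]
      exact ih (by omega) (by omega) (fun j h1 h2 => hh j h1 (by omega))

-- the trigger step: processing a workday at index x with budget exhausted moves start to pvF l k (x+1)
theorem pvF_trigger (l : List Char) (k x w : Nat) (hx : x < l.length) (hw : l[x] = 'w')
    (hk : k ≤ pvC l x) (hfw : pvF l k x ≤ w) (hwx : w ≤ x)
    (hh : ∀ j, pvF l k x ≤ j → j < w → l[j]? = some 'h')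
    (hlw : l[w]? = some 'w') : pvF l k (x + 1) = w + 1 := by
  have hwlen : w < l.length := by omega
  have hex := pvF_exact l k x hk
  have hcw : pvC l w = pvC l (pvF l k x) :=
    pvC_const_of_h l (pvF l k x) w hfw (by omega) hh
  have hlw' : l[w] = 'w' := by
    rw [List.getElem?_eq_getElem hwlen] at hlw
    injection hlw
  have hcw1 : pvC l (w + 1) = pvC l w + 1 := by
    rw [pvC_succ l w hwlen, hlw']; simp
  have hx1 : pvC l (x + 1) = pvC l x + 1 := by
    rw [pvC_succ l x hx, hw]; simp
  have hle : pvF l k (x + 1) ≤ w + 1 :=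
    Nat.find_min' (p := fun L => pvC l (x + 1) ≤ pvC l L + k) ⟨x + 1, Nat.le_add_right _ _⟩
      (by omega)
  have hge : w + 1 ≤ pvF l k (x + 1) := by
    by_contra hcon
    have hF := pvF_spec l k (x + 1)
    have hmono : pvC l (pvF l k (x + 1)) ≤ pvC l w := pvC_mono l (by omega)
    omega
  omega

-- A's loop invariant
theorem pvA_inv (l : List Char) (hwh : ∀ c ∈ l, c = 'w' ∨ c = 'h') (pto : Int) :
    ∀ x, x ≤ l.length →
      ∃ best : Int,
        (PySem.List.enumerate (l.take x)).foldl (pvStepA l) (0, 0, pto)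
          = (best, (pvF l pto.toNat x : Int), max (pto - (pvC l x : Int)) (min pto 0)) ∧
        max best (pvG l pto.toNat x) = pvM l pto.toNat x := by
  intro x
  induction x with
  | zero =>
    intro _
    refine ⟨0, ?_, ?_⟩
    · have h0 : pvF l pto.toNat 0 = 0 := pvF_eq_zero l _ 0 (by simp [pvC])
      simp [PySem.List.enumerate_nil, h0, pvC]
    · simp [pvM, pvG, pvF_eq_zero l _ 0 (by simp [pvC])]
  | succ x ih =>
    intro hx1
    have hx : x < l.length := by omega
    obtain ⟨best, hfold, hbest⟩ := ih (by omega)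
    have htake : l.take (x + 1) = l.take x ++ [l[x]] := by
      rw [List.take_add_one, List.getElem?_eq_getElem hx]; rfl
    have hlen : (l.take x).length = x := by simp; omega
    rw [htake, PySem.List.enumerate_append, List.foldl_append, hfold, hlen]
    have hstep : PySem.List.enumerate [l[x]] ((0 : Int) + (x : Nat)) = [((x : Int), l[x])] := by
      rw [PySem.List.enumerate_cons, PySem.List.enumerate_nil]; norm_num
    rw [hstep]
    simp only [List.foldl_cons, List.foldl_nil]
    rcases hwh l[x] (l.getElem_mem hx) with hcw | hch
    · -- workday step
      have hc1 : pvC l (x + 1) = pvC l x + 1 := by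
        rw [pvC_succ l x hx, hcw]; simp
      by_cases hp : max (pto - (pvC l x : Int)) (min pto 0) > 0
      · -- budget still available
        have hpos : (pvC l x : Int) < pto := by omega
        have hnn : ((pto.toNat : Int)) = pto := Int.toNat_of_nonneg (by omega)
        have hk1 : pvC l (x + 1) ≤ pto.toNat := by omega
        have hf0 : pvF l pto.toNat (x + 1) = 0 := pvF_eq_zero l _ _ hk1
        have hfx0 : pvF l pto.toNat x = 0 := pvF_eq_zero l _ _ (by omega)
        refine ⟨best, ?_, ?_⟩
        · simp only [pvStepA, hcw]
          norm_num [hp, hf0, hfx0]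
          rw [if_neg (by decide : ¬ ('w' : Char) = 'h')]
          refine Prod.ext rfl (Prod.ext rfl ?_)
          simp only []
          omega
        · have hg : pvG l pto.toNat (x + 1) = pvG l pto.toNat x + 1 := by
            unfold pvG; rw [hf0, hfx0]; push_cast; ring
          show max best (pvG l pto.toNat (x + 1)) = max (pvM l pto.toNat x) (pvG l pto.toNat (x + 1))
          omega
      · -- budget exhausted: the trigger step
        have hk : pto.toNat ≤ pvC l x := by omega
        obtain ⟨w, hwrun, hfw, hwx, hall, hend⟩ :=
          pvWhileH_props l x (by omega) (pvF l pto.toNat x) (pvF_le l _ x)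
        have hwlen : w < l.length := by omega
        have hlww : l[w] = 'w' := by
          rcases hend with rfl | hne
          · exact hcw
          · rcases hwh l[w] (l.getElem_mem hwlen) with h | h
            · exact h
            · exact absurd (by rw [List.getElem?_eq_getElem hwlen, h]) hne
        have hlw? : l[w]? = some 'w' := by rw [List.getElem?_eq_getElem hwlen, hlww]
        have hfx1 : pvF l pto.toNat (x + 1) = w + 1 :=
          pvF_trigger l pto.toNat x w hx hcw hk hfw hwx hall hlw?
        refine ⟨max best ((x : Int) - (pvF l pto.toNat x : Int)), ?_, ?_⟩
        · simp only [pvStepA, hcw]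
          norm_num [hp, hwrun, hlw?, hfx1, hc1]
          rw [if_neg (by decide : ¬ ('w' : Char) = 'h')]
          refine Prod.ext rfl (Prod.ext rfl ?_)
          simp only []
          omega
        · have hgle : pvG l pto.toNat (x + 1) ≤ pvG l pto.toNat x := by
            unfold pvG; rw [hfx1]; push_cast; omega
          show _ = max (pvM l pto.toNat x) (pvG l pto.toNat (x + 1))
          unfold pvG at *
          omega
    · -- holiday step
      have hc1 : pvC l (x + 1) = pvC l x := by
        rw [pvC_succ l x hx, hch]; simp
      have hf1 : pvF l pto.toNat (x + 1) = pvF l pto.toNat x := pvF_congr l _ _ _ hc1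
      refine ⟨best, ?_, ?_⟩
      · simp [pvStepA, hch, hf1, hc1]
      · have hg : pvG l pto.toNat (x + 1) = pvG l pto.toNat x + 1 := by
          unfold pvG; rw [hf1]; push_cast; ring
        show max best (pvG l pto.toNat (x + 1)) = max (pvM l pto.toNat x) (pvG l pto.toNat (x + 1))
        omega

theorem pvA_eq_M (cal : String) (pto : Int) (hwh : ∀ c ∈ cal.toList, c = 'w' ∨ c = 'h') :
    find_longest_pto cal pto = pvM cal.toList pto.toNat cal.toList.length := by
  obtain ⟨best, hfold, hbest⟩ := pvA_inv cal.toList hwh pto cal.toList.length le_rfl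
  rw [List.take_length] at hfold
  unfold find_longest_pto
  simp only [hfold]
  exact hbest

-- B's prefix array is the table of pvC values
theorem pvBuildP (l : List Char) :
    l.foldl (fun (P : List Int) ch => P ++ [PySem.List.pyGetD P (-1) 0 + (if ch = 'w' then 1 else 0)]) [0]
      = (List.range (l.length + 1)).map (fun x => (pvC l x : Int)) := by
  induction l using List.reverseRecOn with
  | nil => simp [pvC]
  | append_singleton l c ih =>
    rw [List.foldl_append, ih]
    simp only [List.foldl_cons, List.foldl_nil]
    have hmap : (List.range (l.length + 1)).map (fun x => (pvC l x : Int))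
        = (List.range l.length).map (fun x => (pvC l x : Int)) ++ [(pvC l l.length : Int)] := by
      rw [List.range_succ, List.map_append]; rfl
    rw [hmap, PySem.List.pyGetD_neg_one_append_singleton, ← hmap]
    have hlen : (l ++ [c]).length + 1 = (l.length + 1) + 1 := by simp
    rw [hlen, List.range_succ (n := l.length + 1), List.map_append]
    congr 1
    · refine List.map_congr_left ?_
      intro x hx
      have hx' : x ≤ l.length := by
        have := List.mem_range.mp hx; omega
      unfold pvC
      rw [List.take_append_of_le_length hx']
    · have h1 : pvC (l ++ [c]) (l.length + 1) = pvC l l.length + (if c = 'w' then 1 else 0) := by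
        unfold pvC
        rw [List.take_of_length_le (by simp), List.take_of_length_le (by simp), List.count_append]
        simp [List.count_singleton, beq_iff_eq]
      simp only [List.map_cons, List.map_nil, h1]
      push_cast
      split <;> simp

theorem pvBisect_correct (P : List Int) (t : Int)
    (hmono : ∀ i j, i ≤ j → j < P.length → P.getD i 0 ≤ P.getD j 0) :
    ∀ n lo hi, hi - lo ≤ n → lo ≤ hi → hi ≤ P.length →
      (∀ j, j < lo → P.getD j 0 < t) → (∀ j, hi ≤ j → j < P.length → t ≤ P.getD j 0) →
      (∀ j, j < pvBisect P t lo hi → P.getD j 0 < t) ∧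
      (∀ j, pvBisect P t lo hi ≤ j → j < P.length → t ≤ P.getD j 0) ∧
      pvBisect P t lo hi ≤ P.length := by
  intro n
  induction n with
  | zero =>
    intro lo hi hn hlh hhi h1 h2
    rw [pvBisect, dif_neg (by omega)]
    have : lo = hi := by omega
    subst this
    exact ⟨h1, h2, by omega⟩
  | succ n ih =>
    intro lo hi hn hlh hhi h1 h2
    rw [pvBisect]
    by_cases hc : lo < hi
    · rw [dif_pos hc]
      have hmlt : (lo + hi) / 2 < hi := by omega
      have hmge : lo ≤ (lo + hi) / 2 := by omega
      by_cases hm : P.getD ((lo + hi) / 2) 0 < t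
      · rw [if_pos hm]
        refine ih ((lo + hi) / 2 + 1) hi (by omega) (by omega) hhi ?_ h2
        intro j hj
        calc P.getD j 0 ≤ P.getD ((lo + hi) / 2) 0 := hmono j _ (by omega) (by omega)
          _ < t := hm
      · rw [if_neg hm]
        refine ih lo ((lo + hi) / 2) (by omega) (by omega) (by omega) h1 ?_
        intro j hj hjlen
        calc t ≤ P.getD ((lo + hi) / 2) 0 := by omega
          _ ≤ P.getD j 0 := hmono _ j hj hjlen
    · rw [dif_neg hc]
      have : lo = hi := by omega
      subst this
      exact ⟨h1, h2, by omega⟩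

theorem pvB_eq_M (cal : String) (pto : Int) :
    find_longest_pto_alt cal pto = pvM cal.toList pto.toNat cal.toList.length := by
  unfold find_longest_pto_alt
  rw [pvBuildP cal.toList, PySem.List.pyRange_zero_nat, List.foldl_map]
  set l := cal.toList with hl
  set n := l.length with hn
  set k := pto.toNat with hk
  set Pm := (List.range (n + 1)).map (fun x => (pvC l x : Int)) with hPm
  have hlenP : Pm.length = n + 1 := by simp [hPm]
  have hget : ∀ j, j ≤ n → Pm.getD j 0 = (pvC l j : Int) := by
    intro j hj
    rw [hPm, PySem.List.getD_map_range _ _ _ _ (by omega)]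
  have hmono : ∀ i j, i ≤ j → j < Pm.length → Pm.getD i 0 ≤ Pm.getD j 0 := by
    intro i j hij hjlen
    rw [hget i (by omega), hget j (by omega)]
    exact_mod_cast pvC_mono l hij
  have hkI : (if pto > 0 then pto else 0) = (k : Int) := by
    rw [hk]; split <;> omega
  have hbody : ∀ (r : ℕ), r < n → ∀ best : Int,
      (if ((r : ℕ) : Int) + 1 - (pvBisect Pm (PySem.List.pyGetD Pm (((r : ℕ) : Int) + 1) 0 - (if pto > 0 then pto else 0)) 0 Pm.length : Int) > best
       then ((r : ℕ) : Int) + 1 - (pvBisect Pm (PySem.List.pyGetD Pm (((r : ℕ) : Int) + 1) 0 - (if pto > 0 then pto else 0)) 0 Pm.length : Int) else best)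
        = max best (pvG l k (r + 1)) := by
    intro r hr best
    have hcast : ((r : ℕ) : Int) + 1 = (((r + 1 : ℕ)) : Int) := by push_cast; ring
    rw [hcast, PySem.List.pyGetD_natCast, hget (r + 1) (by omega), hkI]
    set t := ((pvC l (r + 1) : Int)) - (k : Int) with ht
    have hρ := pvBisect_correct Pm t hmono (Pm.length) 0 Pm.length le_rfl (by omega) le_rfl
      (by omega) (by intro j hj hjlen; omega)
    obtain ⟨hρ1, hρ2, hρ3⟩ := hρ
    set ρ := pvBisect Pm t 0 Pm.length with hρdef
    have hfle : pvF l k (r + 1) ≤ r + 1 := pvF_le l k (r + 1)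
    have hρeq : ρ = pvF l k (r + 1) := by
      refine le_antisymm ?_ ?_
      · by_contra hcon
        push Not at hcon
        have h5 := hρ1 (pvF l k (r + 1)) hcon
        rw [hget _ (by omega)] at h5
        have h6 := pvF_spec l k (r + 1)
        omega
      · by_contra hcon
        push Not at hcon
        have h5 := hρ2 ρ le_rfl (by omega)
        rw [hget ρ (by omega)] at h5
        have h6 := pvF_min l k (r + 1) (j := ρ) hcon
        omega
    rw [hρeq]
    unfold pvG
    split <;> omega
  have key : ∀ m, m ≤ n →
      (List.range m).foldl (fun best (r : ℕ) =>
        (if ((r : ℕ) : Int) + 1 - (pvBisect Pm (PySem.List.pyGetD Pm (((r : ℕ) : Int) + 1) 0 - (if pto > 0 then pto else 0)) 0 Pm.length : Int) > best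
         then ((r : ℕ) : Int) + 1 - (pvBisect Pm (PySem.List.pyGetD Pm (((r : ℕ) : Int) + 1) 0 - (if pto > 0 then pto else 0)) 0 Pm.length : Int) else best)) 0
        = pvM l k m := by
    intro m
    induction m with
    | zero => intro _; simp [pvM]
    | succ m ih =>
      intro hm
      rw [List.range_succ, List.foldl_append, ih (by omega)]
      simp only [List.foldl_cons, List.foldl_nil]
      rw [hbody m (by omega)]
      rfl
  exact key n le_rfl

-- ===== VERDICT (by name: the statement is the Claim_ definition above) =====
theorem find_longest_pto_spec : Claim_equal_find_longest_pto := by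
  intro cal pto _ hpre
  have hwh : ∀ c ∈ cal.toList, c = 'w' ∨ c = 'h' := by
    intro c hc
    have := List.all_eq_true.mp hpre c hc
    simpa using this
  unfold Spec_find_longest_pto
  rw [pvA_eq_M cal pto hwh, pvB_eq_M cal pto]
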